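-- pv_equiv track=rewrite | github.com/SohaibAamir28/CALICO-Fall-24-contest | torreznos/templates/torrezno.py | solve_torreznos
-- ===== SOURCE A (Python) =====
-- def solve_torreznos(test_cases):
--     from heapq import heappop, heappush
--     from collections import defaultdict
--
--     def kruskal_mst(n, edges, banned_node=None):
--         # Union-Find data structure
--         parent = list(range(n))
--         rank = [0] * n
--
--         def find(x):
--             if parent[x] != x:
--                 parent[x] = find(parent[x])
--             return parent[x]
--
--         def union(x, y):
--             root_x = find(x)
--             root_y = find(y)
--             if root_x != root_y:
--                 if rank[root_x] > rank[root_y]: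
--                     parent[root_y] = root_x
--                 elif rank[root_x] < rank[root_y]:
--                     parent[root_x] = root_y
--                 else:
--                     parent[root_y] = root_x
--                     rank[root_x] += 1
--                 return True
--             return False
--
--         # Filter edges if banned_node is specified
--         valid_edges = []
--         for u, v, w in edges:
--             if banned_node is not None and (u == banned_node or v == banned_node):
--                 continue
--             valid_edges.append((w, u, v))
--
--         # Sort edges by weight
--         valid_edges.sort()
--
--         mst_cost = 0
--         mst_edges = 0
--
--         # Perform Kruskal's algorithm
--         for w, u, v in valid_edges:
--             if union(u, v):
--                 mst_cost += w
--                 mst_edges += 1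
--                 if mst_edges == n - 1:  # MST is complete
--                     break
--
--         return mst_cost
--
--     results = []
--     for n, m, f, s, edges in test_cases:
--         # Compute the two MSTs
--         cost_f_exclusive = kruskal_mst(n, edges, banned_node=s)
--         cost_s_exclusive = kruskal_mst(n, edges, banned_node=f)
--         results.append(cost_f_exclusive + cost_s_exclusive)
--     return results
-- ===== SOURCE B (Python) =====
-- def solve_torreznos(test_cases):
--     # Sorted-edge sweep with an explicit component labelling instead of union-find:
--     # merging two components relabels every vertex of one class in a single pass.
--     def msf_cost(n, edges, banned):
--         order = sorted((w, u, v) for u, v, w in edges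
--                        if u != banned and v != banned)
--         comp = list(range(n))
--         total = 0
--         merges = 0
--         for w, u, v in order:
--             cu, cv = comp[u], comp[v]
--             if cu != cv:
--                 comp = [cu if c == cv else c for c in comp]
--                 total += w
--                 merges += 1
--                 if merges == n - 1:
--                     break
--         return total
--
--     return [msf_cost(n, edges, s) + msf_cost(n, edges, f)
--             for n, m, f, s, edges in test_cases]
-- ===== Notes on version B (the rewrite author's own statement) =====
-- stated objective: simpler
-- what changed: Replaces Kruskal's union-find (recursive find with path compression, union by rank) with a plain sorted-edge sweep over an explicit component-label array, merging two components by relabelling one class in a single pass.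
import Mathlib
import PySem

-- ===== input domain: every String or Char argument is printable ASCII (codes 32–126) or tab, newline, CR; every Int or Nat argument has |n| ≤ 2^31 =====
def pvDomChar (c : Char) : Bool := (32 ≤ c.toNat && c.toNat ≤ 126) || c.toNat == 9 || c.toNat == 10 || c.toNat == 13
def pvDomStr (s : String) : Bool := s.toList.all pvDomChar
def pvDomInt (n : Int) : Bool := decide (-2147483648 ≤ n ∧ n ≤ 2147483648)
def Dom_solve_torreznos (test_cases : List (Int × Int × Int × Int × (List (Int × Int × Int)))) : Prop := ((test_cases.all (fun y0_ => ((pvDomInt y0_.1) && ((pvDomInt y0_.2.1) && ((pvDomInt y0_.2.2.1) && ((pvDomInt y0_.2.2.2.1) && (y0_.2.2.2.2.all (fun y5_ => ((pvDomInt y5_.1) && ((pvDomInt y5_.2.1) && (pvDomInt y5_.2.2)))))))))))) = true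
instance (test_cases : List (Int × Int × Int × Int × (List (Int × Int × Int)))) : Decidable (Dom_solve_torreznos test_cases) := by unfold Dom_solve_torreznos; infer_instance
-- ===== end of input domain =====

-- B replaces A's union-find Kruskal by a sorted-edge sweep over an explicit component-label
-- array (merge = relabel one class); objective: simpler.  Both sides sort the (w,u,v) triples
-- with the injective key pvSortKey, which realises Python's lexicographic tuple order exactly
-- on the |int| ≤ 2^31 domain Dom_solve_torreznos.
def pvSortKey (e : Int × Int × Int) : Int :=
  (e.1 * 17179869184 + e.2.1) * 17179869184 + e.2.2

-- Python list read l[i] (negative indices wrap; Pre_ keeps every id in range, where A never raises)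
def pvGet (l : List Int) (i : Int) : Int := PySem.List.pyGetD l i 0

-- Python write index l[i] = …: negative indices wrap (exact for -len l ≤ i < len l, the only
-- indices Pre_ admits)
def pvIdx (l : List Int) (i : Int) : Nat := (if i < 0 then i + l.length else i).toNat

-- ===== PORT A =====
-- find(x) with path compression; the fuel only makes the recursion structural
-- (on Pre_ inputs the Python recursion is finite and the fuel is never exhausted).
def pvFind : Nat → List Int → Int → List Int × Int
  | 0, parent, x => (parent, x)
  | f + 1, parent, x =>
    if pvGet parent x ≠ x then
      let pr := pvFind f parent (pvGet parent x)
      (pr.1.set (pvIdx pr.1 x) pr.2, pr.2)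
    else (parent, x)

def pvUnion (fuel : Nat) (parent rank : List Int) (x y : Int) :
    List Int × List Int × Bool :=
  let f1 := pvFind fuel parent x
  let f2 := pvFind fuel f1.1 y
  if f1.2 ≠ f2.2 then
    if pvGet rank f2.2 < pvGet rank f1.2 then (f2.1.set f2.2.toNat f1.2, rank, true)
    else if pvGet rank f1.2 < pvGet rank f2.2 then (f2.1.set f1.2.toNat f2.2, rank, true)
    else (f2.1.set f2.2.toNat f1.2, rank.set f1.2.toNat (pvGet rank f1.2 + 1), true)
  else (f2.1, rank, false)

def pvKruskalLoop (n : Int) (fuel : Nat) :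
    List (Int × Int × Int) → List Int → List Int → Int → Int → Int
  | [], _, _, cost, _ => cost
  | (w, u, v) :: rest, parent, rank, cost, cnt =>
    let r := pvUnion fuel parent rank u v
    if r.2.2 then
      if cnt + 1 = n - 1 then cost + w
      else pvKruskalLoop n fuel rest r.1 r.2.1 (cost + w) (cnt + 1)
    else pvKruskalLoop n fuel rest r.1 r.2.1 cost cnt

def pvKruskal (n : Int) (edges : List (Int × Int × Int)) (banned : Int) : Int :=
  let valid := edges.foldl
    (fun acc e => if e.1 = banned ∨ e.2.1 = banned then acc
                  else acc ++ [(e.2.2, e.1, e.2.1)]) ([] : List (Int × Int × Int))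
  pvKruskalLoop n (n.toNat + edges.length + 1) (PySem.List.sorted valid pvSortKey)
    ((List.range n.toNat).map Int.ofNat) (List.replicate n.toNat (0 : Int)) 0 0

def solve_torreznos (test_cases : List (Int × Int × Int × Int × (List (Int × Int × Int)))) : List Int :=
  test_cases.foldl
    (fun acc t => acc ++ [pvKruskal t.1 t.2.2.2.2 t.2.2.2.1 + pvKruskal t.1 t.2.2.2.2 t.2.2.1]) []

-- ===== PORT B =====
def pvRelabel (comp : List Int) (cv cu : Int) : List Int :=
  comp.map (fun c => if c = cv then cu else c)

def pvMsfLoop (n : Int) : List (Int × Int × Int) → List Int → Int → Int → Int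
  | [], _, total, _ => total
  | (w, u, v) :: rest, comp, total, merges =>
    if pvGet comp u ≠ pvGet comp v then
      if merges + 1 = n - 1 then total + w
      else pvMsfLoop n rest (pvRelabel comp (pvGet comp v) (pvGet comp u)) (total + w) (merges + 1)
    else pvMsfLoop n rest comp total merges

def pvMsf (n : Int) (edges : List (Int × Int × Int)) (banned : Int) : Int :=
  let order := PySem.List.sorted
    ((edges.filter (fun e => ¬ e.1 = banned ∧ ¬ e.2.1 = banned)).map (fun e => (e.2.2, e.1, e.2.1)))
    pvSortKey
  pvMsfLoop n order ((List.range n.toNat).map Int.ofNat) 0 0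

def solve_torreznos_alt (test_cases : List (Int × Int × Int × Int × (List (Int × Int × Int)))) : List Int :=
  test_cases.map (fun t => pvMsf t.1 t.2.2.2.2 t.2.2.2.1 + pvMsf t.1 t.2.2.2.2 t.2.2.1)

-- ===== PRECONDITION & SPEC =====
-- Pre_ admits exactly the inputs on which A returns: every edge endpoint is a valid Python
-- list index into the n-element parent array, i.e. lies in [-n, n) (A raises IndexError
-- otherwise; negative ids wrap onto id+n, which both programs honour) — unless the edge
-- touches both banned nodes f and s, in which case both MST passes filter it out unindexed.
def Pre_solve_torreznos (test_cases : List (Int × Int × Int × Int × (List (Int × Int × Int)))) : Prop :=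
  ∀ t ∈ test_cases, ∀ e ∈ t.2.2.2.2,
    (-t.1 ≤ e.1 ∧ e.1 < t.1 ∧ -t.1 ≤ e.2.1 ∧ e.2.1 < t.1) ∨
    ((e.1 = t.2.2.1 ∨ e.2.1 = t.2.2.1) ∧ (e.1 = t.2.2.2.1 ∨ e.2.1 = t.2.2.2.1))
instance (test_cases : List (Int × Int × Int × Int × (List (Int × Int × Int)))) : Decidable (Pre_solve_torreznos test_cases) := by unfold Pre_solve_torreznos; infer_instance

def pvWitness_solve_torreznos : (List (Int × Int × Int × Int × (List (Int × Int × Int)))) :=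
  [(4, 4, 0, 3, [(0, 1, 5), (1, 2, 3), (2, 3, 7), (0, 2, 2)])]

def Spec_solve_torreznos (test_cases : List (Int × Int × Int × Int × (List (Int × Int × Int)))) (out : List Int) : Prop := out = solve_torreznos_alt test_cases
instance (test_cases : List (Int × Int × Int × Int × (List (Int × Int × Int)))) (out : List Int) : Decidable (Spec_solve_torreznos test_cases out) := by unfold Spec_solve_torreznos; infer_instance

-- ===== CLAIM =====
def Claim_equal_solve_torreznos : Prop := ∀ (test_cases : List (Int × Int × Int × Int × (List (Int × Int × Int)))), Dom_solve_torreznos test_cases → Pre_solve_torreznos test_cases → Spec_solve_torreznos test_cases (solve_torreznos test_cases)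

-- ===== LEMMAS AND PROOFS =====

def pvNth (l : List Int) (i : Nat) : Int := l.getD i 0

lemma pvNth_set (l : List Int) (j : Nat) (v : Int) (i : Nat) :
    pvNth (l.set j v) i = if i = j ∧ j < l.length then v else pvNth l i := by
  simp [pvNth, List.getD, List.getElem?_set]
  split_ifs with h1 h2 h3 h4 <;> simp_all

lemma pvNth_range (N : Nat) (i : Nat) (h : i < N) :
    pvNth ((List.range N).map Int.ofNat) i = i := by
  simp [pvNth, List.getD, h]

lemma pvNth_replicate (N : Nat) (i : Nat) : pvNth (List.replicate N (0:Int)) i = 0 := by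
  simp [pvNth, List.getD, List.getElem?_replicate]
  split_ifs <;> simp
def pvRoot : Nat → List Int → Int → Int
  | 0, _, x => x
  | f + 1, p, x => if pvNth p x.toNat = x then x else pvRoot f p (pvNth p x.toNat)

lemma pvRoot_succ (f : Nat) (p : List Int) (x : Int) :
    pvRoot (f + 1) p x = if pvNth p x.toNat = x then x else pvRoot f p (pvNth p x.toNat) := rfl

def pvWF (N B : Nat) (p r : List Int) : Prop :=
  p.length = N ∧ r.length = N ∧
  (∀ i : Nat, i < N → 0 ≤ pvNth p i ∧ pvNth p i < N) ∧
  (∀ i : Nat, i < N → pvNth p i ≠ (i : Int) → pvNth r i < pvNth r (pvNth p i).toNat) ∧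
  (∀ i : Nat, i < N → 0 ≤ pvNth r i ∧ pvNth r i ≤ B)

lemma pvRoot_stable {N B : Nat} {p r : List Int} (hwf : pvWF N B p r) :
    ∀ (m : Nat) (x : Int) (f₁ f₂ : Nat), 0 ≤ x → x < N →
      (B : Int) ≤ pvNth r x.toNat + m → m < f₁ → m < f₂ →
      pvRoot f₁ p x = pvRoot f₂ p x := by
  obtain ⟨hp, hr, hrange, hinc, hbnd⟩ := hwf
  intro m
  induction m with
  | zero =>
    intro x f₁ f₂ hx0 hxN hm hf₁ hf₂
    obtain ⟨f₁, rfl⟩ : ∃ g, f₁ = g + 1 := ⟨f₁ - 1, by omega⟩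
    obtain ⟨f₂, rfl⟩ : ∃ g, f₂ = g + 1 := ⟨f₂ - 1, by omega⟩
    have hxN' : x.toNat < N := by omega
    by_cases hroot : pvNth p x.toNat = x
    · rw [pvRoot_succ, pvRoot_succ, if_pos hroot, if_pos hroot]
    · -- impossible: rank x < rank (p x) ≤ B ≤ rank x
      exfalso
      have h1 := hinc x.toNat hxN' (by rwa [Int.toNat_of_nonneg hx0])
      have h2 := hrange x.toNat hxN'
      have h3 := hbnd (pvNth p x.toNat).toNat (by omega)
      omega
  | succ m ih =>
    intro x f₁ f₂ hx0 hxN hm hf₁ hf₂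
    obtain ⟨f₁, rfl⟩ : ∃ g, f₁ = g + 1 := ⟨f₁ - 1, by omega⟩
    obtain ⟨f₂, rfl⟩ : ∃ g, f₂ = g + 1 := ⟨f₂ - 1, by omega⟩
    have hxN' : x.toNat < N := by omega
    by_cases hroot : pvNth p x.toNat = x
    · rw [pvRoot_succ, pvRoot_succ, if_pos hroot, if_pos hroot]
    · have h1 := hinc x.toNat hxN' (by rwa [Int.toNat_of_nonneg hx0])
      have h2 := hrange x.toNat hxN'
      rw [pvRoot_succ, pvRoot_succ, if_neg hroot, if_neg hroot]
      exact ih (pvNth p x.toNat) f₁ f₂ h2.1 h2.2 (by omega) (by omega) (by omega)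

lemma pvRoot_props {N B : Nat} {p r : List Int} (hwf : pvWF N B p r) :
    ∀ (m : Nat) (x : Int) (f : Nat), 0 ≤ x → x < N →
      (B : Int) ≤ pvNth r x.toNat + m → m < f →
      (0 ≤ pvRoot f p x ∧ pvRoot f p x < N) ∧
      pvNth p (pvRoot f p x).toNat = pvRoot f p x ∧
      pvNth r x.toNat ≤ pvNth r (pvRoot f p x).toNat := by
  obtain ⟨hp, hr, hrange, hinc, hbnd⟩ := hwf
  intro m
  induction m with
  | zero =>
    intro x f hx0 hxN hm hf
    obtain ⟨f, rfl⟩ : ∃ g, f = g + 1 := ⟨f - 1, by omega⟩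
    have hxN' : x.toNat < N := by omega
    by_cases hroot : pvNth p x.toNat = x
    · rw [pvRoot_succ, if_pos hroot]
      exact ⟨⟨hx0, hxN⟩, hroot, le_refl _⟩
    · exfalso
      have h1 := hinc x.toNat hxN' (by rwa [Int.toNat_of_nonneg hx0])
      have h2 := hrange x.toNat hxN'
      have h3 := hbnd (pvNth p x.toNat).toNat (by omega)
      omega
  | succ m ih =>
    intro x f hx0 hxN hm hf
    obtain ⟨f, rfl⟩ : ∃ g, f = g + 1 := ⟨f - 1, by omega⟩
    have hxN' : x.toNat < N := by omega
    by_cases hroot : pvNth p x.toNat = x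
    · rw [pvRoot_succ, if_pos hroot]
      exact ⟨⟨hx0, hxN⟩, hroot, le_refl _⟩
    · have h1 := hinc x.toNat hxN' (by rwa [Int.toNat_of_nonneg hx0])
      have h2 := hrange x.toNat hxN'
      rw [pvRoot_succ, if_neg hroot]
      have := ih (pvNth p x.toNat) f h2.1 h2.2 (by omega) (by omega)
      exact ⟨this.1, this.2.1, by omega⟩
lemma pvRoot_isRoot {N B F : Nat} {p r : List Int} (hwf : pvWF N B p r)
    (x : Int) (hx0 : 0 ≤ x) (hxN : x < N) (hBF : B < F) :
    (0 ≤ pvRoot F p x ∧ pvRoot F p x < N) ∧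
    pvNth p (pvRoot F p x).toNat = pvRoot F p x ∧
    pvNth r x.toNat ≤ pvNth r (pvRoot F p x).toNat := by
  have hb := hwf.2.2.2.2 x.toNat (by omega)
  exact pvRoot_props hwf B x F hx0 hxN (by omega) hBF

lemma pvRoot_unfold {N B F : Nat} {p r : List Int} (hwf : pvWF N B p r)
    (x : Int) (hx0 : 0 ≤ x) (hxN : x < N) (hBF : B < F) :
    pvRoot F p x = if pvNth p x.toNat = x then x else pvRoot F p (pvNth p x.toNat) := by
  obtain ⟨F, rfl⟩ : ∃ g, F = g + 1 := ⟨F - 1, by omega⟩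
  rw [pvRoot_succ]
  by_cases hroot : pvNth p x.toNat = x
  · rw [if_pos hroot, if_pos hroot]
  · rw [if_neg hroot, if_neg hroot]
    have h1 := hwf.2.2.2.1 x.toNat (by omega) (by rwa [Int.toNat_of_nonneg hx0])
    have h2 := hwf.2.2.1 x.toNat (by omega)
    have h3 := hwf.2.2.2.2 (pvNth p x.toNat).toNat (by omega)
    have h4 := hwf.2.2.2.2 x.toNat (by omega)
    -- B ≥ 1 here, so fuel F and F+1 agree from p x onwards
    exact pvRoot_stable hwf (B - 1) (pvNth p x.toNat) F (F + 1) h2.1 h2.2 (by omega)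
      (by omega) (by omega)

lemma pvRoot_of_isRoot {N B F : Nat} {p r : List Int} (hwf : pvWF N B p r)
    (x : Int) (hx0 : 0 ≤ x) (hxN : x < N) (hBF : B < F)
    (hroot : pvNth p x.toNat = x) : pvRoot F p x = x := by
  rw [pvRoot_unfold hwf x hx0 hxN hBF, if_pos hroot]

lemma pvRoot_strict_rank {N B F : Nat} {p r : List Int} (hwf : pvWF N B p r)
    (x : Int) (hx0 : 0 ≤ x) (hxN : x < N) (hBF : B < F)
    (hnr : pvNth p x.toNat ≠ x) :
    pvNth r x.toNat < pvNth r (pvRoot F p x).toNat := by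
  have h1 := hwf.2.2.2.1 x.toNat (by omega) (by rwa [Int.toNat_of_nonneg hx0])
  have h2 := hwf.2.2.1 x.toNat (by omega)
  have h3 := (pvRoot_isRoot hwf (pvNth p x.toNat) h2.1 h2.2 hBF).2.2
  rw [pvRoot_unfold hwf x hx0 hxN hBF, if_neg hnr]
  omega
lemma pvWF_set_root {N B F : Nat} {p r : List Int} (hwf : pvWF N B p r)
    (x : Int) (hx0 : 0 ≤ x) (hxN : x < N) (hBF : B < F) :
    pvWF N B (p.set x.toNat (pvRoot F p x)) r := by
  set rt := pvRoot F p x with hrt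
  have hro := pvRoot_isRoot hwf x hx0 hxN hBF
  obtain ⟨hp, hr, hrange, hinc, hbnd⟩ := hwf
  refine ⟨by simpa using hp, hr, ?_, ?_, hbnd⟩
  · intro i hi
    rw [pvNth_set]
    split_ifs with h
    · exact hro.1
    · exact hrange i hi
  · intro i hi hne
    rw [pvNth_set] at hne ⊢
    split_ifs at hne ⊢ with h
    · -- i = x.toNat, new parent rt ≠ x
      have hix : (i : Int) = x := by omega
      have hnrx : pvNth p x.toNat ≠ x := by
        intro hroot
        apply hne
        rw [hrt, pvRoot_of_isRoot ⟨hp, hr, hrange, hinc, hbnd⟩ x hx0 hxN hBF hroot]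
        omega
      have := pvRoot_strict_rank ⟨hp, hr, hrange, hinc, hbnd⟩ x hx0 hxN hBF hnrx
      have hieq : i = x.toNat := h.1
      rw [hieq]
      exact this
    · exact hinc i hi hne

lemma pvRoot_set_root {N B F : Nat} {p r : List Int} (hwf : pvWF N B p r)
    (x : Int) (hx0 : 0 ≤ x) (hxN : x < N) (hBF : B < F) :
    ∀ z : Int, 0 ≤ z → z < N →
      pvRoot F (p.set x.toNat (pvRoot F p x)) z = pvRoot F p z := by
  set rt := pvRoot F p x with hrt
  have hro := pvRoot_isRoot hwf x hx0 hxN hBF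
  have hwf' : pvWF N B (p.set x.toNat rt) r := pvWF_set_root hwf x hx0 hxN hBF
  set p' := p.set x.toNat rt with hp'
  have hlen : x.toNat < p.length := by
    have := hwf.1; omega
  have key : ∀ (m : Nat) (z : Int), 0 ≤ z → z < N →
      (B : Int) ≤ pvNth r z.toNat + m → pvRoot F p' z = pvRoot F p z := by
    intro m
    induction m with
    | zero =>
      intro z hz0 hzN hm
      -- rank z ≥ B forces z to be a root of p (and of p' unless z = x with rt ≠ x)
      by_cases hzx : z = x
      · subst hzx
        by_cases hroot : pvNth p z.toNat = z
        · have : rt = z := pvRoot_of_isRoot hwf z hz0 hzN hBF hroot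
          have hpz : pvNth p' z.toNat = z := by
            rw [hp', pvNth_set, if_pos ⟨rfl, hlen⟩, this]
          rw [pvRoot_of_isRoot hwf' z hz0 hzN hBF hpz,
            pvRoot_of_isRoot hwf z hz0 hzN hBF hroot]
        · exfalso
          have h1 := hwf.2.2.2.1 z.toNat (by omega) (by rwa [Int.toNat_of_nonneg hz0])
          have h2 := hwf.2.2.1 z.toNat (by omega)
          have h3 := hwf.2.2.2.2 (pvNth p z.toNat).toNat (by omega)
          omega
      · have hne : z.toNat ≠ x.toNat := by omega
        have hpz : pvNth p' z.toNat = pvNth p z.toNat := by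
          rw [hp', pvNth_set, if_neg (by tauto)]
        by_cases hroot : pvNth p z.toNat = z
        · rw [pvRoot_of_isRoot hwf' z hz0 hzN hBF (by rw [hpz]; exact hroot),
            pvRoot_of_isRoot hwf z hz0 hzN hBF hroot]
        · exfalso
          have h1 := hwf.2.2.2.1 z.toNat (by omega) (by rwa [Int.toNat_of_nonneg hz0])
          have h2 := hwf.2.2.1 z.toNat (by omega)
          have h3 := hwf.2.2.2.2 (pvNth p z.toNat).toNat (by omega)
          omega
    | succ m ih =>
      intro z hz0 hzN hm
      by_cases hzx : z = x
      · subst hzx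
        by_cases hroot : pvNth p z.toNat = z
        · have : rt = z := pvRoot_of_isRoot hwf z hz0 hzN hBF hroot
          have hpz : pvNth p' z.toNat = z := by
            rw [hp', pvNth_set, if_pos ⟨rfl, hlen⟩, this]
          rw [pvRoot_of_isRoot hwf' z hz0 hzN hBF hpz,
            pvRoot_of_isRoot hwf z hz0 hzN hBF hroot]
        · -- p' z = rt, rt is a root of p' distinct from z
          have hrtz : rt ≠ z := by
            intro h
            exact hroot (h ▸ hro.2.1)
          have hpz : pvNth p' z.toNat = rt := by
            rw [hp', pvNth_set, if_pos ⟨rfl, hlen⟩]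
          have hrtroot' : pvNth p' rt.toNat = rt := by
            rw [hp', pvNth_set, if_neg (by
              intro hc
              exact hrtz (by omega))]
            exact hro.2.1
          rw [pvRoot_unfold hwf' z hz0 hzN hBF, if_neg (by rw [hpz]; exact hrtz), hpz,
            pvRoot_of_isRoot hwf' rt hro.1.1 hro.1.2 hBF hrtroot']
      · have hne : z.toNat ≠ x.toNat := by omega
        have hpz : pvNth p' z.toNat = pvNth p z.toNat := by
          rw [hp', pvNth_set, if_neg (by tauto)]
        by_cases hroot : pvNth p z.toNat = z
        · rw [pvRoot_of_isRoot hwf' z hz0 hzN hBF (by rw [hpz]; exact hroot),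
            pvRoot_of_isRoot hwf z hz0 hzN hBF hroot]
        · have h1 := hwf.2.2.2.1 z.toNat (by omega) (by rwa [Int.toNat_of_nonneg hz0])
          have h2 := hwf.2.2.1 z.toNat (by omega)
          rw [pvRoot_unfold hwf' z hz0 hzN hBF, if_neg (by rw [hpz]; exact hroot), hpz,
            pvRoot_unfold hwf z hz0 hzN hBF, if_neg hroot]
          exact ih (pvNth p z.toNat) h2.1 h2.2 (by omega)
  intro z hz0 hzN
  exact key B z hz0 hzN (by have := hwf.2.2.2.2 z.toNat (by omega); omega)


lemma pvGet_eq (l : List Int) (x : Int) (hx : 0 ≤ x) : pvGet l x = pvNth l x.toNat := by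
  rw [pvGet, pvNth, PySem.List.pyGetD_of_nonneg l 0 hx]

lemma pvGet_neg (l : List Int) (x : Int) (hx : x < 0) (hxl : -(l.length : Int) ≤ x) :
    pvGet l x = pvNth l (x + l.length).toNat := by
  rw [pvGet, pvNth]
  simp only [PySem.List.pyGetD, PySem.List.pyGet?, PySem.List.pyIdx?, List.getD_eq_getElem?_getD]
  rw [if_neg (by omega), if_pos hxl]
  have h : l.length - (-x).toNat = (x + l.length).toNat := by omega
  rw [h]
  rfl

lemma pvIdx_nonneg (l : List Int) (x : Int) (hx : 0 ≤ x) : pvIdx l x = x.toNat := by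
  rw [pvIdx, if_neg (by omega)]

lemma pvFind_length : ∀ (f : Nat) (p : List Int) (x : Int), (pvFind f p x).1.length = p.length := by
  intro f
  induction f with
  | zero => intro p x; rfl
  | succ f ih =>
    intro p x
    show (if pvGet p x ≠ x then _ else _ : List Int × Int).1.length = _
    split_ifs with h
    · simpa using ih p (pvGet p x)
    · rfl

lemma pvFind_succ (f : Nat) (p : List Int) (x : Int) :
    pvFind (f + 1) p x =
      if pvGet p x ≠ x then
        ((pvFind f p (pvGet p x)).1.set (pvIdx (pvFind f p (pvGet p x)).1 x) (pvFind f p (pvGet p x)).2,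
         (pvFind f p (pvGet p x)).2)
      else (p, x) := rfl

lemma pvFind_spec {N B F : Nat} {r : List Int} :
    ∀ (m f : Nat) (p : List Int) (x : Int), pvWF N B p r → 0 ≤ x → x < N →
      (B : Int) ≤ pvNth r x.toNat + m → m < f → B < F →
      (pvFind f p x).2 = pvRoot F p x ∧ pvWF N B (pvFind f p x).1 r ∧
      (∀ z : Int, 0 ≤ z → z < N → pvRoot F (pvFind f p x).1 z = pvRoot F p z) := by
  intro m
  induction m with
  | zero =>
    intro f p x hwf hx0 hxN hm hf hBF
    obtain ⟨f, rfl⟩ : ∃ g, f = g + 1 := ⟨f - 1, by omega⟩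
    by_cases hroot : pvNth p x.toNat = x
    · rw [pvFind_succ, if_neg (by rw [pvGet_eq _ _ hx0]; simpa using hroot)]
      exact ⟨(pvRoot_of_isRoot hwf x hx0 hxN hBF hroot).symm, hwf, fun z _ _ => rfl⟩
    · exfalso
      have h1 := hwf.2.2.2.1 x.toNat (by omega) (by rwa [Int.toNat_of_nonneg hx0])
      have h2 := hwf.2.2.1 x.toNat (by omega)
      have h3 := hwf.2.2.2.2 (pvNth p x.toNat).toNat (by omega)
      omega
  | succ m ih =>
    intro f p x hwf hx0 hxN hm hf hBF
    obtain ⟨f, rfl⟩ : ∃ g, f = g + 1 := ⟨f - 1, by omega⟩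
    by_cases hroot : pvNth p x.toNat = x
    · rw [pvFind_succ, if_neg (by rw [pvGet_eq _ _ hx0]; simpa using hroot)]
      exact ⟨(pvRoot_of_isRoot hwf x hx0 hxN hBF hroot).symm, hwf, fun z _ _ => rfl⟩
    · have h1 := hwf.2.2.2.1 x.toNat (by omega) (by rwa [Int.toNat_of_nonneg hx0])
      have h2 := hwf.2.2.1 x.toNat (by omega)
      rw [pvFind_succ, if_pos (by rw [pvGet_eq _ _ hx0]; simpa using hroot), pvGet_eq _ _ hx0]
      obtain ⟨hIH1, hIH2, hIH3⟩ :=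
        ih f p (pvNth p x.toNat) hwf h2.1 h2.2 (by omega) (by omega) hBF
      have hrtx : pvRoot F p (pvNth p x.toNat) = pvRoot F p x := by
        rw [pvRoot_unfold hwf x hx0 hxN hBF, if_neg hroot]
      set p1 := (pvFind f p (pvNth p x.toNat)).1 with hp1
      rw [pvIdx_nonneg p1 x hx0]
      have hrt1 : (pvFind f p (pvNth p x.toNat)).2 = pvRoot F p1 x := by
        rw [hIH1, hrtx, ← hIH3 x hx0 hxN]
      constructor
      · simp only [hIH1, hrtx]
      constructor
      · rw [hrt1]
        exact pvWF_set_root hIH2 x hx0 hxN hBF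
      · intro z hz0 hzN
        rw [hrt1]
        rw [pvRoot_set_root hIH2 x hx0 hxN hBF z hz0 hzN]
        exact hIH3 z hz0 hzN

lemma pvMerge_spec {N B F : Nat} {p r : List Int} (hwf : pvWF N B p r)
    (a b : Int) (ha0 : 0 ≤ a) (haN : a < N) (hb0 : 0 ≤ b) (hbN : b < N)
    (hra : pvNth p a.toNat = a) (hrb : pvNth p b.toNat = b) (hab : a ≠ b)
    (r' : List Int) (hlen' : r'.length = N)
    (hbnd' : ∀ i : Nat, i < N → 0 ≤ pvNth r' i ∧ pvNth r' i ≤ B + 1)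
    (hinc' : ∀ i : Nat, i < N → pvNth p i ≠ (i : Int) → pvNth r' i < pvNth r' (pvNth p i).toNat)
    (hba : pvNth r' b.toNat < pvNth r' a.toNat)
    (hBF : B + 1 < F) :
    pvWF N (B + 1) (p.set b.toNat a) r' ∧
    ∀ z : Int, 0 ≤ z → z < N →
      pvRoot F (p.set b.toNat a) z = if pvRoot F p z = b then a else pvRoot F p z := by
  have hBF0 : B < F := by omega
  have hlenp : b.toNat < p.length := by have := hwf.1; omega
  set p' := p.set b.toNat a with hp'
  have hwf' : pvWF N (B + 1) p' r' := by
    obtain ⟨hp, hr, hrange, hinc, hbnd⟩ := hwf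
    refine ⟨by simp [hp', hp], hlen', ?_, ?_, hbnd'⟩
    · intro i hi
      rw [hp', pvNth_set]
      split_ifs with h
      · exact ⟨ha0, haN⟩
      · exact hrange i hi
    · intro i hi hne
      rw [hp', pvNth_set] at hne ⊢
      split_ifs at hne ⊢ with h
      · rw [h.1]
        exact hba
      · exact hinc' i hi hne
  refine ⟨hwf', ?_⟩
  have key : ∀ (m : Nat) (z : Int), 0 ≤ z → z < N →
      ((B : Int) + 1) ≤ pvNth r' z.toNat + m →
      pvRoot F p' z = if pvRoot F p z = b then a else pvRoot F p z := by
    intro m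
    induction m with
    | zero =>
      intro z hz0 hzN hm
      by_cases hzb : z = b
      · exfalso
        have h3 := hbnd' a.toNat (by omega)
        subst hzb
        omega
      · have hne : z.toNat ≠ b.toNat := by omega
        have hpz : pvNth p' z.toNat = pvNth p z.toNat := by
          rw [hp', pvNth_set, if_neg (by tauto)]
        by_cases hroot : pvNth p z.toNat = z
        · rw [pvRoot_of_isRoot hwf' z hz0 hzN hBF (by rw [hpz]; exact hroot),
            pvRoot_of_isRoot hwf z hz0 hzN hBF0 hroot, if_neg (by omega)]
        · exfalso
          have h1 := hinc' z.toNat (by omega) (by rwa [Int.toNat_of_nonneg hz0])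
          have h2 := hwf.2.2.1 z.toNat (by omega)
          have h3 := hbnd' (pvNth p z.toNat).toNat (by omega)
          omega
    | succ m ih =>
      intro z hz0 hzN hm
      by_cases hzb : z = b
      · subst hzb
        have hpz : pvNth p' z.toNat = a := by
          rw [hp', pvNth_set, if_pos ⟨rfl, hlenp⟩]
        have haroot' : pvNth p' a.toNat = a := by
          rw [hp', pvNth_set, if_neg (by intro hc; exact hab (by omega))]
          exact hra
        rw [pvRoot_unfold hwf' z hz0 hzN hBF, if_neg (by rw [hpz]; exact hab),
          hpz, pvRoot_of_isRoot hwf' a ha0 haN hBF haroot',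
          pvRoot_of_isRoot hwf z hz0 hzN hBF0 hrb, if_pos rfl]
      · have hne : z.toNat ≠ b.toNat := by omega
        have hpz : pvNth p' z.toNat = pvNth p z.toNat := by
          rw [hp', pvNth_set, if_neg (by tauto)]
        by_cases hroot : pvNth p z.toNat = z
        · rw [pvRoot_of_isRoot hwf' z hz0 hzN hBF (by rw [hpz]; exact hroot),
            pvRoot_of_isRoot hwf z hz0 hzN hBF0 hroot, if_neg (by omega)]
        · have h1 := hinc' z.toNat (by omega) (by rwa [Int.toNat_of_nonneg hz0])
          have h2 := hwf.2.2.1 z.toNat (by omega)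
          rw [pvRoot_unfold hwf' z hz0 hzN hBF, if_neg (by rw [hpz]; exact hroot), hpz,
            pvRoot_unfold hwf z hz0 hzN hBF0, if_neg hroot]
          exact ih (pvNth p z.toNat) h2.1 h2.2 (by omega)
  intro z hz0 hzN
  exact key (B + 1) z hz0 hzN (by have := hbnd' z.toNat (by omega); omega)

lemma pvUnion_def (F : Nat) (p r : List Int) (u v : Int) :
    pvUnion F p r u v =
      (if (pvFind F p u).2 ≠ (pvFind F (pvFind F p u).1 v).2 then
        if pvGet r (pvFind F (pvFind F p u).1 v).2 < pvGet r (pvFind F p u).2 then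
          ((pvFind F (pvFind F p u).1 v).1.set (pvFind F (pvFind F p u).1 v).2.toNat (pvFind F p u).2, r, true)
        else if pvGet r (pvFind F p u).2 < pvGet r (pvFind F (pvFind F p u).1 v).2 then
          ((pvFind F (pvFind F p u).1 v).1.set (pvFind F p u).2.toNat (pvFind F (pvFind F p u).1 v).2, r, true)
        else
          ((pvFind F (pvFind F p u).1 v).1.set (pvFind F (pvFind F p u).1 v).2.toNat (pvFind F p u).2,
           r.set (pvFind F p u).2.toNat (pvGet r (pvFind F p u).2 + 1), true)
      else ((pvFind F (pvFind F p u).1 v).1, r, false)) := rfl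

lemma pvUnion_spec {N B F : Nat} {p r : List Int} (hwf : pvWF N B p r)
    (u v : Int) (hu0 : 0 ≤ u) (huN : u < N) (hv0 : 0 ≤ v) (hvN : v < N) (hBF : B + 1 < F) :
    ((pvUnion F p r u v).2.2 = true ↔ pvRoot F p u ≠ pvRoot F p v) ∧
    (pvRoot F p u = pvRoot F p v →
       (pvUnion F p r u v).2.1 = r ∧ pvWF N B (pvUnion F p r u v).1 r ∧
       (∀ z : Int, 0 ≤ z → z < N → pvRoot F (pvUnion F p r u v).1 z = pvRoot F p z)) ∧
    (pvRoot F p u ≠ pvRoot F p v →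
       pvWF N (B + 1) (pvUnion F p r u v).1 (pvUnion F p r u v).2.1 ∧
       ∃ c d : Int,
         ((c = pvRoot F p u ∧ d = pvRoot F p v) ∨ (c = pvRoot F p v ∧ d = pvRoot F p u)) ∧
         ∀ z : Int, 0 ≤ z → z < N →
           pvRoot F (pvUnion F p r u v).1 z = if pvRoot F p z = d then c else pvRoot F p z) := by
  have hBF0 : B < F := by omega
  have hbu := hwf.2.2.2.2 u.toNat (by omega)
  obtain ⟨hf1a, hf1b, hf1c⟩ := pvFind_spec (N := N) (B := B) (F := F) (r := r)
    B F p u hwf hu0 huN (by omega) hBF0 hBF0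
  set p1 := (pvFind F p u).1 with hp1
  have hbv := hwf.2.2.2.2 v.toNat (by omega)
  obtain ⟨hf2a, hf2b, hf2c⟩ := pvFind_spec (N := N) (B := B) (F := F) (r := r)
    B F p1 v hf1b hv0 hvN (by omega) hBF0 hBF0
  set p2 := (pvFind F p1 v).1 with hp2
  -- roots of p2 are the roots of p
  have hpres : ∀ z : Int, 0 ≤ z → z < N → pvRoot F p2 z = pvRoot F p z := by
    intro z hz0 hzN
    rw [hf2c z hz0 hzN, hf1c z hz0 hzN]
  have hru : (pvFind F p u).2 = pvRoot F p u := hf1a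
  have hrv : (pvFind F p1 v).2 = pvRoot F p v := by
    rw [hf2a, hf1c v hv0 hvN]
  set ru := pvRoot F p u with hruDef
  set rv := pvRoot F p v with hrvDef
  have hruP := pvRoot_isRoot hwf u hu0 huN hBF0
  have hrvP := pvRoot_isRoot hwf v hv0 hvN hBF0
  -- ru, rv are roots of p2
  have hruR : pvNth p2 ru.toNat = ru := by
    have := (pvRoot_isRoot hf2b u hu0 huN hBF0).2.1
    rwa [hpres u hu0 huN] at this
  have hrvR : pvNth p2 rv.toNat = rv := by
    have := (pvRoot_isRoot hf2b v hv0 hvN hBF0).2.1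
    rwa [hpres v hv0 hvN] at this
  by_cases hne : ru ≠ rv
  · refine ⟨?_, fun h => absurd h hne, fun _ => ?_⟩
    · rw [pvUnion_def, hru, hrv, if_pos hne]
      split_ifs <;> simp [hne]
    · rw [pvUnion_def, hru, hrv, if_pos hne]
      have hbru := hwf.2.2.2.2 ru.toNat (by have := hruP.1; omega)
      have hbrv := hwf.2.2.2.2 rv.toNat (by have := hrvP.1; omega)
      split_ifs with hc1 hc2
      · -- rank rv < rank ru : parent[rv] := ru
        rw [pvGet_eq _ _ hrvP.1.1, pvGet_eq _ _ hruP.1.1] at hc1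
        obtain ⟨hW, hRt⟩ := pvMerge_spec hf2b ru rv hruP.1.1 hruP.1.2 hrvP.1.1 hrvP.1.2
          hruR hrvR hne r hwf.2.1
          (fun i hi => by have := hwf.2.2.2.2 i hi; omega)
          (fun i hi h => hf2b.2.2.2.1 i hi h) hc1 hBF
        refine ⟨hW, ru, rv, Or.inl ⟨rfl, rfl⟩, fun z hz0 hzN => ?_⟩
        rw [hRt z hz0 hzN, hpres z hz0 hzN]
      · -- rank ru < rank rv : parent[ru] := rv
        rw [pvGet_eq _ _ hruP.1.1, pvGet_eq _ _ hrvP.1.1] at hc2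
        obtain ⟨hW, hRt⟩ := pvMerge_spec hf2b rv ru hrvP.1.1 hrvP.1.2 hruP.1.1 hruP.1.2
          hrvR hruR (Ne.symm hne) r hwf.2.1
          (fun i hi => by have := hwf.2.2.2.2 i hi; omega)
          (fun i hi h => hf2b.2.2.2.1 i hi h) hc2 hBF
        refine ⟨hW, rv, ru, Or.inr ⟨rfl, rfl⟩, fun z hz0 hzN => ?_⟩
        rw [hRt z hz0 hzN, hpres z hz0 hzN]
      · -- equal ranks : parent[rv] := ru, rank[ru] += 1
        rw [pvGet_eq _ _ hrvP.1.1, pvGet_eq _ _ hruP.1.1] at hc1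
        rw [pvGet_eq _ _ hruP.1.1, pvGet_eq _ _ hrvP.1.1] at hc2
        simp only [← hruDef, ← hrvDef] at hc1 hc2
        have hreq : pvNth r ru.toNat = pvNth r rv.toNat := by omega
        set r' := r.set ru.toNat (pvGet r ru + 1) with hr'
        have hlenr : ru.toNat < r.length := by have := hwf.2.1; have := hruP.1; omega
        have hr'len : r'.length = N := by rw [hr']; simpa using hwf.2.1
        have hr'get : ∀ i : Nat, pvNth r' i = if i = ru.toNat then pvNth r ru.toNat + 1 else pvNth r i := by
          intro i
          rw [hr', pvNth_set]
          split_ifs with h1 h2 h3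
          · rw [pvGet_eq _ _ hruP.1.1]
          · omega
          · omega
          · rfl
        obtain ⟨hW, hRt⟩ := pvMerge_spec hf2b ru rv hruP.1.1 hruP.1.2 hrvP.1.1 hrvP.1.2
          hruR hrvR hne r' hr'len
          (fun i hi => by
            rw [hr'get]
            have := hwf.2.2.2.2 i hi
            split_ifs <;> omega)
          (fun i hi h => by
            have hold := hf2b.2.2.2.1 i hi h
            have hiru : i ≠ ru.toNat := by
              intro hc
              apply h
              rw [hc, hruR]
              have := hruP.1
              omega
            rw [hr'get, hr'get, if_neg hiru]
            split_ifs with hcase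
            · rw [hcase] at hold
              omega
            · omega)
          (by
            rw [hr'get, hr'get, if_pos rfl, if_neg (by
              intro hc
              exact hne (by have := hruP.1; have := hrvP.1; omega))]
            omega) hBF
        refine ⟨hW, ru, rv, Or.inl ⟨rfl, rfl⟩, fun z hz0 hzN => ?_⟩
        rw [hRt z hz0 hzN, hpres z hz0 hzN]
  · rw [not_not] at hne
    refine ⟨?_, fun _ => ?_, fun h => absurd hne h⟩
    · rw [pvUnion_def, hru, hrv, if_neg (by simpa using hne)]
      simpa using hne
    · rw [pvUnion_def, hru, hrv, if_neg (by simpa using hne)]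
      exact ⟨rfl, hf2b, hpres⟩

def pvNorm (N : Nat) (x : Int) : Int := if x < 0 then x + N else x

lemma pvFind_neg {N B : Nat} {p r : List Int} (hwf : pvWF N B p r) (x : Int)
    (hx : x < 0) (hxN : -(N : Int) ≤ x) (f : Nat) (hf : 2 ≤ f) :
    pvFind f p x = pvFind f p (x + N) := by
  obtain ⟨f, rfl⟩ : ∃ g, f = g + 1 := ⟨f - 1, by omega⟩
  have hlen : p.length = N := hwf.1
  set x' := x + (N : Int) with hx'
  have hx'0 : 0 ≤ x' := by omega
  have hx'N : x' < N := by omega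
  have hnx : x'.toNat < N := by omega
  have hgx : pvGet p x = pvNth p x'.toNat := by
    rw [pvGet_neg p x hx (by rw [hlen]; omega), hlen]
  have hgx' : pvGet p x' = pvNth p x'.toNat := pvGet_eq p x' hx'0
  have hvp := hwf.2.2.1 x'.toNat hnx
  have hcond : pvGet p x ≠ x := by rw [hgx]; omega
  rw [pvFind_succ, pvFind_succ, if_pos hcond]
  by_cases hroot : pvNth p x'.toNat = x'
  · rw [if_neg (by rw [hgx']; exact not_not_intro hroot)]
    obtain ⟨f, rfl⟩ : ∃ g, f = g + 1 := ⟨f - 1, by omega⟩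
    rw [hgx, hroot, pvFind_succ, if_neg (by rw [hgx']; exact not_not_intro hroot)]
    have hidx : pvIdx p x = x'.toNat := by
      rw [pvIdx, if_pos hx, hlen]
    rw [hidx]
    have hgetl : x'.toNat < p.length := by omega
    have hget : p[x'.toNat] = x' := by
      have h := hroot
      rwa [pvNth, List.getD_eq_getElem _ _ hgetl] at h
    have hsetself := List.set_getElem_self hgetl
    rw [hget] at hsetself
    rw [hsetself]
  · rw [if_pos (by rw [hgx']; simpa using hroot), hgx, hgx']
    have hidx : pvIdx (pvFind f p (pvNth p x'.toNat)).1 x = x'.toNat := by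
      rw [pvIdx, if_pos hx, pvFind_length, hlen]
    rw [hidx, pvIdx_nonneg _ _ hx'0]

lemma pvNth_relabel (comp : List Int) (cv cu : Int) (i : Nat) (hi : i < comp.length) :
    pvNth (pvRelabel comp cv cu) i = if pvNth comp i = cv then cu else pvNth comp i := by
  simp [pvRelabel, pvNth, List.getD, List.getElem?_map, List.getElem?_eq_getElem hi]

lemma pvCollapse_iff (x y c d : Int) (_hcd : c ≠ d) :
    ((if x = d then c else x) = (if y = d then c else y)) ↔
      (x = y ∨ ((x = c ∨ x = d) ∧ (y = c ∨ y = d))) := by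
  split_ifs <;> omega

lemma pvKruskalLoop_cons (n : Int) (F : Nat) (w u v : Int) (rest : List (Int × Int × Int))
    (p r : List Int) (cost cnt : Int) :
    pvKruskalLoop n F ((w, u, v) :: rest) p r cost cnt =
      if (pvUnion F p r u v).2.2 then
        (if cnt + 1 = n - 1 then cost + w
         else pvKruskalLoop n F rest (pvUnion F p r u v).1 (pvUnion F p r u v).2.1 (cost + w) (cnt + 1))
      else pvKruskalLoop n F rest (pvUnion F p r u v).1 (pvUnion F p r u v).2.1 cost cnt := rfl

lemma pvMsfLoop_cons (n : Int) (w u v : Int) (rest : List (Int × Int × Int))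
    (comp : List Int) (total merges : Int) :
    pvMsfLoop n ((w, u, v) :: rest) comp total merges =
      if pvGet comp u ≠ pvGet comp v then
        (if merges + 1 = n - 1 then total + w
         else pvMsfLoop n rest (pvRelabel comp (pvGet comp v) (pvGet comp u)) (total + w) (merges + 1))
      else pvMsfLoop n rest comp total merges := rfl

lemma pvLoop_eq {N F : Nat} (n : Int) :
    ∀ (rest : List (Int × Int × Int)) (p r comp : List Int) (cost : Int) (k : Nat),
      pvWF N k p r → comp.length = N →
      (∀ a b : Int, 0 ≤ a → a < N → 0 ≤ b → b < N →
        (pvRoot F p a = pvRoot F p b ↔ pvNth comp a.toNat = pvNth comp b.toNat)) →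
      (∀ e ∈ rest, -(N : Int) ≤ e.2.1 ∧ e.2.1 < (N : Int) ∧ -(N : Int) ≤ e.2.2 ∧ e.2.2 < (N : Int)) →
      k + rest.length < F →
      pvKruskalLoop n F rest p r cost (k : Int) = pvMsfLoop n rest comp cost (k : Int) := by
  intro rest
  induction rest with
  | nil => intro p r comp cost k _ _ _ _ _; rfl
  | cons e rest ih =>
    obtain ⟨w, u, v⟩ := e
    intro p r comp cost k hwf hclen hcross hbnds hfuel
    obtain ⟨huL, huN, hvL, hvN⟩ := hbnds (w, u, v) (List.mem_cons_self)
    dsimp only at huL huN hvL hvN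
    have hbnds' := fun e he => hbnds e (List.mem_cons_of_mem _ he)
    have hBF1 : k + 1 < F := by simp at hfuel; omega
    have hNpos : 0 < N := by omega
    set u' := pvNorm N u with hu'def
    set v' := pvNorm N v with hv'def
    have hu0 : 0 ≤ u' := by rw [hu'def, pvNorm]; split_ifs <;> omega
    have hu'N : u' < N := by rw [hu'def, pvNorm]; split_ifs <;> omega
    have hv0 : 0 ≤ v' := by rw [hv'def, pvNorm]; split_ifs <;> omega
    have hv'N : v' < N := by rw [hv'def, pvNorm]; split_ifs <;> omega
    -- negative Python indices wrap: both ports read/write node u at slot u + n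
    have hfu : pvFind F p u = pvFind F p u' := by
      rw [hu'def, pvNorm]
      split_ifs with h
      · exact pvFind_neg hwf u h (by omega) F (by omega)
      · rfl
    obtain ⟨-, hwfu, -⟩ := pvFind_spec (N := N) (B := k) (F := F) (r := r) k F p u' hwf hu0 hu'N
      (by have := hwf.2.2.2.2 u'.toNat (by omega); omega) (by omega) (by omega)
    have hfv : pvFind F (pvFind F p u').1 v = pvFind F (pvFind F p u').1 v' := by
      rw [hv'def, pvNorm]
      split_ifs with h
      · exact pvFind_neg hwfu v h (by omega) F (by omega)
      · rfl
    have hswap : pvUnion F p r u v = pvUnion F p r u' v' := by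
      rw [pvUnion_def, pvUnion_def, hfu, hfv]
    obtain ⟨hUb, hUeq, hUne⟩ := pvUnion_spec hwf u' v' hu0 hu'N hv0 hv'N hBF1
    have hcuv : pvGet comp u = pvNth comp u'.toNat := by
      rw [hu'def, pvNorm]
      split_ifs with h
      · rw [pvGet_neg comp u h (by rw [hclen]; omega), hclen]
      · rw [pvGet_eq comp u (by omega)]
    have hcvv : pvGet comp v = pvNth comp v'.toNat := by
      rw [hv'def, pvNorm]
      split_ifs with h
      · rw [pvGet_neg comp v h (by rw [hclen]; omega), hclen]
      · rw [pvGet_eq comp v (by omega)]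
    rw [pvKruskalLoop_cons, pvMsfLoop_cons, hswap]
    by_cases hEq : pvRoot F p u' = pvRoot F p v'
    · have hb : (pvUnion F p r u' v').2.2 = false := by
        cases hB : (pvUnion F p r u' v').2.2
        · rfl
        · exact absurd hEq (hUb.mp hB)
      obtain ⟨hr1, hwf1, hpres1⟩ := hUeq hEq
      have hcEq : pvNth comp u'.toNat = pvNth comp v'.toNat :=
        (hcross u' v' hu0 hu'N hv0 hv'N).mp hEq
      rw [hb]
      simp only [Bool.false_eq_true, if_false]
      rw [if_neg (show ¬(pvGet comp u ≠ pvGet comp v) by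
        rw [hcuv, hcvv]; exact not_not_intro hcEq)]
      rw [hr1]
      exact ih (pvUnion F p r u' v').1 r comp cost k hwf1 hclen
        (fun a b ha0 haN hb0 hbN => by
          rw [hpres1 a ha0 haN, hpres1 b hb0 hbN]; exact hcross a b ha0 haN hb0 hbN)
        hbnds' (by simp at hfuel ⊢; omega)
    · have hb : (pvUnion F p r u' v').2.2 = true := hUb.mpr hEq
      have hcNe : pvNth comp u'.toNat ≠ pvNth comp v'.toNat := by
        intro h
        exact hEq ((hcross u' v' hu0 hu'N hv0 hv'N).mpr h)
      rw [hb, if_pos rfl]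
      rw [if_pos (show (pvGet comp u ≠ pvGet comp v) by
        rw [hcuv, hcvv]; exact hcNe)]
      by_cases hbreak : (k : Int) + 1 = n - 1
      · rw [if_pos hbreak, if_pos hbreak]
      · rw [if_neg hbreak, if_neg hbreak]
        obtain ⟨hwf1, c, d, hcd, hRt⟩ := hUne hEq
        rw [hcuv, hcvv]
        set cu := pvNth comp u'.toNat with hcu
        set cv := pvNth comp v'.toNat with hcv
        have hcdne : c ≠ d := by
          rcases hcd with ⟨rfl, rfl⟩ | ⟨rfl, rfl⟩
          · exact hEq
          · exact Ne.symm hEq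
        have hmem : ∀ a : Int, 0 ≤ a → a < N →
            ((pvRoot F p a = c ∨ pvRoot F p a = d) ↔
             (pvNth comp a.toNat = cu ∨ pvNth comp a.toNat = cv)) := by
          intro a ha0 haN
          have h1 := hcross a u' ha0 haN hu0 hu'N
          have h2 := hcross a v' ha0 haN hv0 hv'N
          rcases hcd with ⟨rfl, rfl⟩ | ⟨rfl, rfl⟩
          · exact or_congr h1 h2
          · rw [or_comm]
            exact or_congr h1 h2
        have hcross' : ∀ a b : Int, 0 ≤ a → a < N → 0 ≤ b → b < N →
            (pvRoot F (pvUnion F p r u' v').1 a = pvRoot F (pvUnion F p r u' v').1 b ↔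
             pvNth (pvRelabel comp cv cu) a.toNat = pvNth (pvRelabel comp cv cu) b.toNat) := by
          intro a b ha0 haN hb0 hbN
          rw [hRt a ha0 haN, hRt b hb0 hbN,
            pvNth_relabel comp cv cu a.toNat (by omega),
            pvNth_relabel comp cv cu b.toNat (by omega),
            pvCollapse_iff _ _ c d hcdne,
            pvCollapse_iff _ _ cu cv hcNe]
          have h1 := hcross a b ha0 haN hb0 hbN
          have h2 := hmem a ha0 haN
          have h3 := hmem b hb0 hbN
          exact or_congr h1 (and_congr h2 h3)
        have : ((k : Int) + 1) = ((k + 1 : Nat) : Int) := by push_cast; ring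
        rw [this]
        exact ih (pvUnion F p r u' v').1 (pvUnion F p r u' v').2.1
          (pvRelabel comp cv cu) (cost + w) (k + 1) hwf1
          (by simp [pvRelabel, hclen])
          hcross' hbnds' (by simp at hfuel ⊢; omega)

lemma pvValid_eq (edges : List (Int × Int × Int)) (banned : Int) :
    edges.foldl (fun acc e => if e.1 = banned ∨ e.2.1 = banned then acc
                  else acc ++ [(e.2.2, e.1, e.2.1)]) [] =
    (edges.filter (fun e => ¬ e.1 = banned ∧ ¬ e.2.1 = banned)).map
      (fun e => (e.2.2, e.1, e.2.1)) := by
  have h1 : edges.foldl (fun acc e => if e.1 = banned ∨ e.2.1 = banned then acc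
                  else acc ++ [(e.2.2, e.1, e.2.1)]) [] =
      edges.foldl (fun acc e => if ¬ e.1 = banned ∧ ¬ e.2.1 = banned then
          acc ++ [(e.2.2, e.1, e.2.1)] else acc) [] := by
    apply PySem.List.foldl_congr_mem
    intro acc e _
    by_cases h : e.1 = banned ∨ e.2.1 = banned
    · rw [if_pos h, if_neg (by tauto)]
    · rw [if_neg h, if_pos (by tauto)]
  rw [h1, PySem.List.foldl_append_ite]
  simp

lemma pvCase_eq (n : Int) (edges : List (Int × Int × Int)) (banned : Int)
    (hb : ∀ e ∈ edges, ¬ e.1 = banned → ¬ e.2.1 = banned →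
      -n ≤ e.1 ∧ e.1 < n ∧ -n ≤ e.2.1 ∧ e.2.1 < n) :
    pvKruskal n edges banned = pvMsf n edges banned := by
  simp only [pvKruskal, pvMsf]
  rw [pvValid_eq]
  set N := n.toNat with hN
  set F := n.toNat + edges.length + 1 with hF
  set sortedE := PySem.List.sorted
    ((edges.filter (fun e => ¬ e.1 = banned ∧ ¬ e.2.1 = banned)).map
      (fun e => (e.2.2, e.1, e.2.1))) pvSortKey with hsorted
  have hinitP : ∀ i : Nat, i < N → pvNth ((List.range N).map Int.ofNat) i = i :=
    fun i hi => pvNth_range N i hi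
  have hwf0 : pvWF N 0 ((List.range N).map Int.ofNat) (List.replicate N (0 : Int)) := by
    refine ⟨by simp, by simp, ?_, ?_, ?_⟩
    · intro i hi
      rw [hinitP i hi]
      constructor <;> omega
    · intro i hi hne
      exact absurd (hinitP i hi) hne
    · intro i hi
      rw [pvNth_replicate]
      omega
  have hcross0 : ∀ a b : Int, 0 ≤ a → a < N → 0 ≤ b → b < N →
      (pvRoot F ((List.range N).map Int.ofNat) a = pvRoot F ((List.range N).map Int.ofNat) b ↔
       pvNth ((List.range N).map Int.ofNat) a.toNat = pvNth ((List.range N).map Int.ofNat) b.toNat) := by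
    intro a b ha0 haN hb0 hbN
    have hFpos : 0 < F := by rw [hF]; omega
    have hra : pvRoot F ((List.range N).map Int.ofNat) a = a :=
      pvRoot_of_isRoot hwf0 a ha0 haN hFpos
        (by rw [hinitP a.toNat (by omega)]; omega)
    have hrb : pvRoot F ((List.range N).map Int.ofNat) b = b :=
      pvRoot_of_isRoot hwf0 b hb0 hbN hFpos
        (by rw [hinitP b.toNat (by omega)]; omega)
    rw [hra, hrb, hinitP a.toNat (by omega), hinitP b.toNat (by omega)]
    omega
  have hbnds : ∀ e ∈ sortedE, -(N : Int) ≤ e.2.1 ∧ e.2.1 < (N : Int) ∧ -(N : Int) ≤ e.2.2 ∧ e.2.2 < (N : Int) := by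
    intro e he
    rw [hsorted, PySem.List.mem_sorted] at he
    obtain ⟨e0, he0, rfl⟩ := List.mem_map.mp he
    obtain ⟨he0m, he0p⟩ := List.mem_filter.mp he0
    obtain ⟨hnb1, hnb2⟩ := of_decide_eq_true he0p
    have he0' := hb e0 he0m hnb1 hnb2
    have hn : (N : Int) = n := by rw [hN]; omega
    rw [hn]
    exact ⟨he0'.1, he0'.2.1, he0'.2.2.1, he0'.2.2.2⟩
  have hfuel : 0 + sortedE.length < F := by
    have h1 : sortedE.length ≤ edges.length := by
      rw [hsorted, PySem.List.length_sorted, List.length_map]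
      exact List.length_filter_le _ _
    rw [hF]
    omega
  have := pvLoop_eq (N := N) (F := F) n sortedE
    ((List.range N).map Int.ofNat) (List.replicate N (0 : Int))
    ((List.range N).map Int.ofNat) 0 0 hwf0 (by simp) hcross0 hbnds hfuel
  simpa using this

-- ===== VERDICT =====
theorem solve_torreznos_spec : Claim_equal_solve_torreznos := by
  unfold Claim_equal_solve_torreznos
  intro tcs hdom hpre
  unfold Spec_solve_torreznos solve_torreznos solve_torreznos_alt
  rw [PySem.List.foldl_append_singleton_eq_map]
  simp only [List.nil_append]
  apply List.map_congr_left
  intro t ht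
  have hbt := hpre t ht
  have hbS : ∀ e ∈ t.2.2.2.2, ¬ e.1 = t.2.2.2.1 → ¬ e.2.1 = t.2.2.2.1 →
      -t.1 ≤ e.1 ∧ e.1 < t.1 ∧ -t.1 ≤ e.2.1 ∧ e.2.1 < t.1 := by
    intro e he h1 h2
    rcases hbt e he with h | ⟨_, hs⟩
    · exact h
    · rcases hs with h | h
      · exact absurd h h1
      · exact absurd h h2
  have hbF : ∀ e ∈ t.2.2.2.2, ¬ e.1 = t.2.2.1 → ¬ e.2.1 = t.2.2.1 →
      -t.1 ≤ e.1 ∧ e.1 < t.1 ∧ -t.1 ≤ e.2.1 ∧ e.2.1 < t.1 := by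
    intro e he h1 h2
    rcases hbt e he with h | ⟨hf, _⟩
    · exact h
    · rcases hf with h | h
      · exact absurd h h1
      · exact absurd h h2
  rw [pvCase_eq t.1 t.2.2.2.2 t.2.2.2.1 hbS, pvCase_eq t.1 t.2.2.2.2 t.2.2.1 hbF]
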